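-- pv_equiv track=rewrite | github.com/DavJ/theta-bot | history/legacy_scripts/patch_theta_fft_variants_scripts_apply_theta_patch.py | ensure_args
-- ===== SOURCE A (Python) =====
-- def ensure_args(text: str):
--     changed_local = False
--     additions = [
--         ("--theta-K", "ap.add_argument('--theta-K', type=int, default=16)"),
--         ("--theta-tau", "ap.add_argument('--theta-tau', type=float, default=0.25)"),
--         ("--theta-tau-re", "ap.add_argument('--theta-tau-re', type=float, default=0.03)"),
--         ("--theta-beta-re", "ap.add_argument('--theta-beta-re', type=float, default=0.0)"),
--         ("--theta-beta-im", "ap.add_argument('--theta-beta-im', type=float, default=0.0)"),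
--         ("--theta-ridge", "ap.add_argument('--theta-ridge', type=float, default=1e-3)"),
--         ("--theta-gs", "ap.add_argument('--theta-gs', action='store_true')"),
--     ]
--
--     parse_pos = text.find("args = ap.parse_args()")
--     if parse_pos == -1:
--         # very defensive: append small block
--         insertion = "\n" + "\n".join([a[1] for a in additions]) + "\n"
--         text = text + insertion
--         return text, True
--
--     # try to insert before parse_args if missing
--     for key, line in additions:
--         if key not in text:
--             text = text[:parse_pos] + line + "\n" + text[parse_pos:]
--             parse_pos += len(line) + 1
--             changed_local = True
--
--     return text, changed_local
-- ===== SOURCE B (Python) =====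
-- def ensure_args(text: str):
--     additions = [
--         ("--theta-K", "ap.add_argument('--theta-K', type=int, default=16)"),
--         ("--theta-tau", "ap.add_argument('--theta-tau', type=float, default=0.25)"),
--         ("--theta-tau-re", "ap.add_argument('--theta-tau-re', type=float, default=0.03)"),
--         ("--theta-beta-re", "ap.add_argument('--theta-beta-re', type=float, default=0.0)"),
--         ("--theta-beta-im", "ap.add_argument('--theta-beta-im', type=float, default=0.0)"),
--         ("--theta-ridge", "ap.add_argument('--theta-ridge', type=float, default=1e-3)"),
--         ("--theta-gs", "ap.add_argument('--theta-gs', action='store_true')"),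
--     ]
--     pos = text.find("args = ap.parse_args()")
--     if pos == -1:
--         # very defensive: append small block
--         return text + "\n" + "\n".join(line for _, line in additions) + "\n", True
--     missing = [line for key, line in additions if key not in text]
--     block = "".join(line + "\n" for line in missing)
--     return text[:pos] + block + text[pos:], bool(missing)
-- ===== Notes on version B (the rewrite author's own statement) =====
-- stated objective: simpler
-- what changed: Replaces the incremental insert-and-advance-pointer loop with a gather-then-single-splice decomposition: one filtering pass computes the missing lines against the original text, then the whole block is spliced once at the parse_args position.
import Mathlib
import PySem

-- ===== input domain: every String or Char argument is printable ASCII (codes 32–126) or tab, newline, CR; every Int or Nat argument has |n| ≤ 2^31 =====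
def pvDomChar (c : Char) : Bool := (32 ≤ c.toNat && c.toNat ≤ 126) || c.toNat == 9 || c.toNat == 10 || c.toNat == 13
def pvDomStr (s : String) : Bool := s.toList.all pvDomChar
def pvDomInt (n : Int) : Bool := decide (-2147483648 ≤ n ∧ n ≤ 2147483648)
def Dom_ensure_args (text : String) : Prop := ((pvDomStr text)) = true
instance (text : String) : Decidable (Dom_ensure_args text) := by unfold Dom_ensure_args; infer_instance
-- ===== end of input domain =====

-- B replaces A's incremental insert-and-advance-pointer loop by a gather-then-single-splice
-- decomposition (one filtering pass computes the missing lines, spliced once); objective: simpler.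

-- ===== PORT A =====

def pStrA : List Char := "args = ap.parse_args()".toList

def additionsA : List (List Char × List Char) :=
  [ ("--theta-K".toList, "ap.add_argument('--theta-K', type=int, default=16)".toList),
    ("--theta-tau".toList, "ap.add_argument('--theta-tau', type=float, default=0.25)".toList),
    ("--theta-tau-re".toList, "ap.add_argument('--theta-tau-re', type=float, default=0.03)".toList),
    ("--theta-beta-re".toList, "ap.add_argument('--theta-beta-re', type=float, default=0.0)".toList),
    ("--theta-beta-im".toList, "ap.add_argument('--theta-beta-im', type=float, default=0.0)".toList),
    ("--theta-ridge".toList, "ap.add_argument('--theta-ridge', type=float, default=1e-3)".toList),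
    ("--theta-gs".toList, "ap.add_argument('--theta-gs', action='store_true')".toList) ]

-- A's for-loop: state (text, parse_pos, changed_local); `text[:p] + line + "\n" + text[p:]` with the
-- nonnegative in-range index p is exactly `t.take p ++ line ++ '\n' :: t.drop p`.
def aLoop : List (List Char × List Char) → List Char × Nat × Bool → List Char × Nat × Bool
  | [], st => st
  | (key, line) :: rest, (t, pos, ch) =>
    if PySem.Chars.isIn key t then aLoop rest (t, pos, ch)
    else aLoop rest (t.take pos ++ (line ++ '\n' :: t.drop pos), pos + (line.length + 1), true)

def ensure_args (text : String) : String × Bool :=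
  let cs := text.toList
  let parse_pos := PySem.Chars.find cs pStrA
  if parse_pos = -1 then
    -- very defensive: append small block
    (String.ofList (cs ++ ('\n' :: (PySem.Chars.join ['\n'] (additionsA.map Prod.snd) ++ ['\n']))), true)
  else
    -- here parse_pos ≥ 0, so Python's int slice index equals take/drop at parse_pos.toNat (exact)
    let r := aLoop additionsA (cs, parse_pos.toNat, false)
    (String.ofList r.1, r.2.2)

-- ===== PORT B =====

def pStrB : List Char := "args = ap.parse_args()".toList

def additionsB : List (List Char × List Char) :=
  [ ("--theta-K".toList, "ap.add_argument('--theta-K', type=int, default=16)".toList),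
    ("--theta-tau".toList, "ap.add_argument('--theta-tau', type=float, default=0.25)".toList),
    ("--theta-tau-re".toList, "ap.add_argument('--theta-tau-re', type=float, default=0.03)".toList),
    ("--theta-beta-re".toList, "ap.add_argument('--theta-beta-re', type=float, default=0.0)".toList),
    ("--theta-beta-im".toList, "ap.add_argument('--theta-beta-im', type=float, default=0.0)".toList),
    ("--theta-ridge".toList, "ap.add_argument('--theta-ridge', type=float, default=1e-3)".toList),
    ("--theta-gs".toList, "ap.add_argument('--theta-gs', action='store_true')".toList) ]

def ensure_args_alt (text : String) : String × Bool :=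
  let cs := text.toList
  let pos := PySem.Chars.find cs pStrB
  if pos = -1 then
    (String.ofList (cs ++ ('\n' :: (PySem.Chars.join ['\n'] (additionsB.map Prod.snd) ++ ['\n']))), true)
  else
    -- pos ≥ 0 here, so `text[:pos]`/`text[pos:]` are take/drop at pos.toNat (exact)
    let missing := (additionsB.filter (fun p => !(PySem.Chars.isIn p.1 cs))).map Prod.snd
    let block := (missing.map (fun l => l ++ ['\n'])).flatten
    (String.ofList (cs.take pos.toNat ++ (block ++ cs.drop pos.toNat)), !missing.isEmpty)

-- ===== PRECONDITION & SPEC =====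
def Spec_ensure_args (text : String) (out : String × Bool) : Prop := out = ensure_args_alt text
instance (text : String) (out : String × Bool) : Decidable (Spec_ensure_args text out) := by unfold Spec_ensure_args; infer_instance

-- ===== CLAIM (what is proved, stated in full; the proofs are below) =====
def Claim_equal_ensure_args : Prop := ∀ (text : String), Dom_ensure_args text → Spec_ensure_args text (ensure_args text)

-- ===== LEMMAS AND PROOFS =====

-- all seven insertion blocks (line plus trailing newline)
def blocksA : List (List Char) := additionsA.map (fun p => p.2 ++ ['\n'])

-- triangular membership discipline of A's loop: each key is checked only against blocks already inserted
def okTail : List (List Char) → List (List Char × List Char) → Bool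
  | _, [] => true
  | prior, (key, line) :: rest =>
      prior.all (fun b => !(PySem.Chars.isIn key b)) && okTail (prior ++ [line ++ ['\n']]) rest

theorem fact_tri : okTail [] additionsA = true := by decide

theorem fact_suffixes : ∀ kl ∈ additionsA, ∀ s2 ∈ kl.1.tails, s2 = [] ∨
    (¬ s2 <+: pStrA ∧ ∀ b ∈ blocksA, ¬ s2 <+: b) := by decide

theorem fact_no_newline : ∀ kl ∈ additionsA, ('\n' : Char) ∉ kl.1 := by decide

theorem fact_len : ∀ kl ∈ additionsA, kl.1.length ≤ pStrA.length ∧ ∀ b ∈ blocksA, kl.1.length ≤ b.length := by decide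

-- infix of a concatenation decomposes: wholly left, wholly right, or crossing the seam
theorem infix_append_iff {α : Type} (k A B : List α) :
    k <:+: A ++ B ↔ k <:+: A ∨ k <:+: B ∨
      ∃ s1 s2, k = s1 ++ s2 ∧ s1 ≠ [] ∧ s2 ≠ [] ∧ s1 <:+ A ∧ s2 <+: B := by
  constructor
  · rintro ⟨s, t, hst⟩
    have hk : k <+: (A ++ B).drop s.length := by
      rw [← hst, List.append_assoc, List.drop_left]; exact List.prefix_append k t
    rw [List.drop_append] at hk
    by_cases hsA : A.length ≤ s.length
    · right; left
      have hnil : A.drop s.length = [] := by simp [List.drop_eq_nil_iff]; omega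
      rw [hnil, List.nil_append] at hk
      exact hk.isInfix.trans (List.drop_suffix _ _).isInfix
    · push Not at hsA
      by_cases hlen : k.length ≤ A.length - s.length
      · left
        have h1 : k <+: A.drop s.length :=
          (List.isPrefix_append_of_length (l₃ := B.drop (s.length - A.length)) (by simp; omega)).mp hk
        exact h1.isInfix.trans (List.drop_suffix _ _).isInfix
      · right; right
        push Not at hlen
        have hpre : A.drop s.length <+: k := by
          refine List.prefix_of_prefix_length_le (List.prefix_append _ _) hk ?_
          simp; omega
        obtain ⟨s2, hs2⟩ := hpre
        refine ⟨A.drop s.length, s2, hs2.symm, ?_, ?_, List.drop_suffix _ _, ?_⟩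
        · simp [List.drop_eq_nil_iff]; omega
        · intro h; subst h; simp at hs2
          have := congrArg List.length hs2
          simp at this; omega
        · have hkk : A.drop s.length ++ s2 <+: A.drop s.length ++ B.drop (s.length - A.length) := by
            rw [hs2]; exact hk
          have h2 := (List.prefix_append_right_inj _).mp hkk
          have h0 : s.length - A.length = 0 := by omega
          rwa [h0, List.drop_zero] at h2
  · rintro (h | h | ⟨s1, s2, rfl, _, _, ⟨u, hu⟩, ⟨v, hv⟩⟩)
    · exact h.trans List.infix_append_left
    · exact h.trans List.infix_append_right
    · exact ⟨u, v, by rw [← hu, ← hv]; simp⟩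

-- a nonempty suffix of a key never begins the right-hand content (which starts with a block or with pStrA)
theorem no_cross (key X Y : List Char)
    (hs : ∀ s2 ∈ key.tails, s2 = [] ∨ ¬ s2 <+: Y) :
    ¬ ∃ s1 s2, key = s1 ++ s2 ∧ s1 ≠ [] ∧ s2 ≠ [] ∧ s1 <:+ X ∧ s2 <+: Y := by
  rintro ⟨s1, s2, hk, -, h2, -, hpre⟩
  rcases hs s2 ((List.mem_tails _ _).mpr ⟨s1, hk.symm⟩) with h | h
  · exact h2 h
  · exact h hpre

theorem isIn_insert_eq (key X D : List Char) (bs : List (List Char))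
    (hP : pStrA <+: D)
    (hbsB : ∀ b ∈ bs, b ∈ blocksA)
    (hnot : ∀ b ∈ bs, PySem.Chars.isIn key b = false)
    (hF2 : ∀ s2 ∈ key.tails, s2 = [] ∨ (¬ s2 <+: pStrA ∧ ∀ b ∈ blocksA, ¬ s2 <+: b))
    (hF3 : ('\n' : Char) ∉ key)
    (hLP : key.length ≤ pStrA.length)
    (hLB : ∀ b ∈ blocksA, key.length ≤ b.length) :
    PySem.Chars.isIn key (X ++ (bs.flatten ++ D)) = PySem.Chars.isIn key (X ++ D) := by
  -- any nonempty suffix of the key fails to begin the content to the right of the seam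
  have hsD : ∀ s2 ∈ key.tails, s2 = [] ∨ ¬ s2 <+: D := by
    intro s2 hmem
    rcases hF2 s2 hmem with h | ⟨hP2, -⟩
    · exact Or.inl h
    · refine Or.inr (fun hpre => hP2 ?_)
      refine List.prefix_of_prefix_length_le hpre hP ?_
      calc s2.length ≤ key.length := ((List.mem_tails _ _).mp hmem).length_le
        _ ≤ pStrA.length := hLP
  have hsFD : ∀ s2 ∈ key.tails, s2 = [] ∨ ¬ s2 <+: bs.flatten ++ D := by
    intro s2 hmem
    cases hbs : bs with
    | nil =>
      rcases hsD s2 hmem with h | h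
      · exact Or.inl h
      · exact Or.inr (by simpa using h)
    | cons b bs' =>
      rcases hF2 s2 hmem with h | ⟨-, hB2⟩
      · exact Or.inl h
      · refine Or.inr (fun hpre => hB2 b (hbsB b (by simp [hbs])) ?_)
        simp only [List.flatten_cons, List.append_assoc] at hpre
        refine (List.isPrefix_append_of_length ?_).mp hpre
        calc s2.length ≤ key.length := ((List.mem_tails _ _).mp hmem).length_le
          _ ≤ b.length := hLB b (hbsB b (by simp [hbs]))
  have hmid : key <:+: bs.flatten ++ D ↔ key <:+: D := by
    clear hsFD
    induction bs with
    | nil => simp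
    | cons b bs' ih =>
      have hbB : b ∈ blocksA := hbsB b (by simp)
      have hnotb : ¬ key <:+: b :=
        (PySem.Chars.isIn_eq_false_iff _ _).mp (hnot b (by simp))
      have ih' := ih (fun x hx => hbsB x (by simp [hx])) (fun x hx => hnot x (by simp [hx]))
      simp only [List.flatten_cons, List.append_assoc]
      rw [infix_append_iff]
      constructor
      · rintro (h | h | ⟨s1, s2, hk, h1, -, hsuf, -⟩)
        · exact absurd h hnotb
        · exact ih'.mp h
        · -- a nonempty suffix of a block ends with the newline, which the key cannot contain
          exfalso
          obtain ⟨p, -, hb⟩ := List.mem_map.mp hbB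
          obtain ⟨u, hu⟩ := hsuf
          have hlast : s1.getLast? = some '\n' := by
            rw [← List.getLast?_append_of_ne_nil u h1, hu, ← hb]
            exact List.getLast?_concat
          exact hF3 (by rw [hk]; exact List.mem_append_left _ (List.mem_of_getLast? hlast))
      · intro h; exact Or.inr (Or.inl (ih'.mpr h))
  rw [Bool.eq_iff_iff, PySem.Chars.isIn_iff_infix, PySem.Chars.isIn_iff_infix,
    infix_append_iff, infix_append_iff key X D]
  constructor
  · rintro (h | h | hc)
    · exact Or.inl h
    · exact Or.inr (Or.inl (hmid.mp h))
    · exact absurd hc (no_cross key X _ hsFD)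
  · rintro (h | h | hc)
    · exact Or.inl h
    · exact Or.inr (Or.inl (hmid.mpr h))
    · exact absurd hc (no_cross key X _ hsD)

def newBlocks (cs : List Char) (adds : List (List Char × List Char)) : List Char :=
  ((adds.filter (fun kl => !(PySem.Chars.isIn kl.1 cs))).map (fun kl => kl.2 ++ ['\n'])).flatten

theorem aLoop_eq (X D : List Char) (hP : pStrA <+: D) :
    ∀ (adds : List (List Char × List Char)) (prior bs : List (List Char)) (ch : Bool),
    okTail prior adds = true →
    (∀ b ∈ bs, b ∈ prior) →
    (∀ b ∈ prior, b ∈ blocksA) →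
    (∀ kl ∈ adds, kl ∈ additionsA) →
    aLoop adds (X ++ (bs.flatten ++ D), X.length + bs.flatten.length, ch)
      = (X ++ ((bs.flatten ++ newBlocks (X ++ D) adds) ++ D),
         X.length + (bs.flatten.length + (newBlocks (X ++ D) adds).length),
         ch || !(adds.filter (fun kl => !(PySem.Chars.isIn kl.1 (X ++ D)))).isEmpty) := by
  intro adds
  induction adds with
  | nil =>
    intro prior bs ch _ _ _ _
    simp [aLoop, newBlocks]
  | cons kl rest ih =>
    obtain ⟨key, line⟩ := kl
    intro prior bs ch hok hbsp hpB hinA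
    have hklA : (key, line) ∈ additionsA := hinA _ (by simp)
    have hblkB : line ++ ['\n'] ∈ blocksA := List.mem_map_of_mem (l := additionsA) hklA
    simp only [okTail, Bool.and_eq_true, List.all_eq_true] at hok
    obtain ⟨hall, hrest⟩ := hok
    have hbsB : ∀ b ∈ bs, b ∈ blocksA := fun b hb => hpB b (hbsp b hb)
    have hnot : ∀ b ∈ bs, PySem.Chars.isIn key b = false := by
      intro b hb
      have := hall b (hbsp b hb)
      simpa using this
    obtain ⟨hLP, hLB⟩ := fact_len _ hklA
    have hiso : PySem.Chars.isIn key (X ++ (bs.flatten ++ D)) = PySem.Chars.isIn key (X ++ D) :=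
      isIn_insert_eq key X D bs hP hbsB hnot (fact_suffixes _ hklA) (fact_no_newline _ hklA) hLP hLB
    simp only [aLoop, hiso]
    by_cases hin : PySem.Chars.isIn key (X ++ D) = true
    · rw [if_pos hin]
      have := ih (prior ++ [line ++ ['\n']]) bs ch hrest
        (fun b hb => List.mem_append_left _ (hbsp b hb))
        (by intro b hb
            rcases List.mem_append.mp hb with h | h
            · exact hpB b h
            · simp at h; subst h; exact hblkB)
        (fun kl hkl => hinA kl (by simp [hkl]))
      rw [this]
      simp [newBlocks, hin]
    · rw [if_neg hin]
      have hsplit : X ++ (bs.flatten ++ D) = (X ++ bs.flatten) ++ D := by simp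
      have hlen : (X ++ bs.flatten).length = X.length + bs.flatten.length := by simp
      have htake : (X ++ (bs.flatten ++ D)).take (X.length + bs.flatten.length) = X ++ bs.flatten := by
        rw [hsplit]; exact List.take_left' hlen
      have hdrop : (X ++ (bs.flatten ++ D)).drop (X.length + bs.flatten.length) = D := by
        rw [hsplit]; exact List.drop_left' hlen
      rw [htake, hdrop]
      have hstate : (X ++ bs.flatten) ++ (line ++ '\n' :: D)
          = X ++ ((bs ++ [line ++ ['\n']]).flatten ++ D) := by simp
      rw [hstate]
      have hpos : X.length + bs.flatten.length + (line.length + 1)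
          = X.length + (bs ++ [line ++ ['\n']]).flatten.length := by simp; omega
      rw [hpos]
      have := ih (prior ++ [line ++ ['\n']]) (bs ++ [line ++ ['\n']]) true hrest
        (by intro b hb
            rcases List.mem_append.mp hb with h | h
            · exact List.mem_append_left _ (hbsp b h)
            · exact List.mem_append_right _ h)
        (by intro b hb
            rcases List.mem_append.mp hb with h | h
            · exact hpB b h
            · simp at h; subst h; exact hblkB)
        (fun kl hkl => hinA kl (by simp [hkl]))
      rw [this]
      have hinF : (!PySem.Chars.isIn key (X ++ D)) = true := by simp [hin]
      simp only [newBlocks, List.filter_cons, hinF, if_pos, List.map_cons, List.flatten_cons,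
        List.isEmpty_cons, Bool.not_false, Bool.or_true, Bool.true_or]
      simp [List.append_assoc]
      omega

-- ===== VERDICT (by name: the statement is the Claim_ definition above) =====
theorem ensure_args_spec : Claim_equal_ensure_args := by
  intro text _
  unfold Spec_ensure_args ensure_args ensure_args_alt
  have hPB : pStrB = pStrA := rfl
  have hAB : additionsB = additionsA := rfl
  rw [hPB, hAB]
  by_cases hp : PySem.Chars.find text.toList pStrA = -1
  · simp [hp]
  · rw [if_neg hp, if_neg hp]
    have h0 : 0 ≤ PySem.Chars.find text.toList pStrA := by
      have := PySem.Chars.neg_one_le_find text.toList pStrA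
      omega
    have hP : pStrA <+: text.toList.drop (PySem.Chars.find text.toList pStrA).toNat :=
      (PySem.Chars.find_spec h0).1
    set p := (PySem.Chars.find text.toList pStrA).toNat with hpdef
    have hple : p ≤ text.toList.length := by
      have := PySem.Chars.find_le_length (s := text.toList) (sub := pStrA)
      omega
    have hXlen : (text.toList.take p).length = p := by
      rw [List.length_take, Nat.min_eq_left hple]
    have hsplit : text.toList.take p ++ text.toList.drop p = text.toList :=
      List.take_append_drop p text.toList
    have key := aLoop_eq (text.toList.take p) (text.toList.drop p) hP additionsA [] [] false
      fact_tri (by simp) (by simp) (fun kl h => h)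
    simp only [List.flatten_nil, List.nil_append, List.length_nil,
      Nat.add_zero, Nat.zero_add, Bool.false_or] at key
    rw [hsplit, hXlen] at key
    rw [key]
    simp [newBlocks, List.map_map, Function.comp_def]
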